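-- pv_equiv track=rewrite | github.com/abolfazlj00/algorithm-challenge-backend-sanaap | consecutive_numbers/main/app.py | has_n_consecutive_ones_circular
-- ===== SOURCE A (Python) =====
-- def has_n_consecutive_ones_circular(binary_str: str, n: int) -> bool:
--     """
--     Check whether a binary string contains `n` consecutive '1's,
--     considering circular rotation (end connected to start).
--
--     Args:
--         binary_str (str): Input binary string (e.g., '1010111'). Must contain only '0' and '1'.
--         n (int): Number of consecutive '1's to search for. Must be >= 1.
--
--     Returns:
--         bool: True if there are `n` consecutive '1's in the circular string, otherwise False.
--
--     Raises:
--         ValueError: If n < 1, or binary_str contains characters other than '0' and '1'.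
--     """
--     if n < 1:
--         raise ValueError("n must be >= 1")
--     if any(ch not in {"0", "1"} for ch in binary_str):
--         raise ValueError("binary_str must contain only '0' and '1' characters")
--
--     if n > len(binary_str):
--         return False
--
--     circular = binary_str + binary_str
--     target = "1" * n
--     return target in circular
-- ===== SOURCE B (Python) =====
-- def has_n_consecutive_ones_circular(binary_str: str, n: int) -> bool:
--     if n < 1:
--         raise ValueError("n must be >= 1")
--     if any(ch not in {"0", "1"} for ch in binary_str):
--         raise ValueError("binary_str must contain only '0' and '1' characters")
--
--     L = len(binary_str)
--     if n > L:
--         return False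
--
--     # one pass: longest run of '1's and the trailing run
--     best = cur = 0
--     for ch in binary_str:
--         cur = cur + 1 if ch == "1" else 0
--         if cur > best:
--             best = cur
--     if best == L:          # all ones; n <= L so it fits
--         return True
--     # circular wrap: leading run + trailing run
--     prefix = 0
--     for ch in binary_str:
--         if ch != "1":
--             break
--         prefix += 1
--     return max(best, prefix + cur) >= n
-- ===== Notes on version B (the rewrite author's own statement) =====
-- stated objective: alternative
-- what changed: Replaces building the doubled string and substring-searching '1'*n in it by a single run-length scan that tracks the longest run of '1's plus the prefix+suffix wrap-around run.
import Mathlib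
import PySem

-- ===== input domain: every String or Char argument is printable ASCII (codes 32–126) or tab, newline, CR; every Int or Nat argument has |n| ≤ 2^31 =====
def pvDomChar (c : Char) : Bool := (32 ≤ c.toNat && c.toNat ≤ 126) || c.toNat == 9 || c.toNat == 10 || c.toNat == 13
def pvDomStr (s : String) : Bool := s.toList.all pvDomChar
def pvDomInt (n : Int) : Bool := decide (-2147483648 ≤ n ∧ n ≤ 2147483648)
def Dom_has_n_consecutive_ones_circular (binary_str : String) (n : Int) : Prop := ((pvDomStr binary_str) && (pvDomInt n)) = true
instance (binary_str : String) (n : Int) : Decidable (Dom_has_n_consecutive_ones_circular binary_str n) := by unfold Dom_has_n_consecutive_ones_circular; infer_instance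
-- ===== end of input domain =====

-- B replaces A's doubled-string substring search by a single run-length scan (longest '1'-run plus the prefix+suffix wrap-around run); alternative algorithm, equal on every non-raising input.


-- ===== PORT A =====
-- literal transliteration of A: both ValueError guards, the length guard, then the '1'*n substring test in the doubled string
def has_n_consecutive_ones_circular (binary_str : String) (n : Int) : Bool :=
  let s := binary_str.toList
  if n < 1 then false              -- Python: raise ValueError (excluded by Pre_)
  else if s.any (fun ch => !(ch == '0' || ch == '1')) then false  -- Python: raise ValueError (excluded by Pre_)
  else if (s.length : Int) < n then false
  else PySem.Chars.isIn (List.replicate n.toNat '1') (s ++ s)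

-- ===== PORT B =====
-- B's single scan: (best run so far, current run) accumulator
def pvRunFold (s : List Char) : Nat × Nat :=
  s.foldl (fun bc ch =>
    let cur := if ch = '1' then bc.2 + 1 else 0
    (if bc.1 < cur then cur else bc.1, cur)) (0, 0)

-- B's second loop: leading run of '1's (break at the first non-'1')
def pvPrefixOnes : List Char → Nat
  | [] => 0
  | ch :: t => if ch = '1' then pvPrefixOnes t + 1 else 0

def has_n_consecutive_ones_circular_alt (binary_str : String) (n : Int) : Bool :=
  let s := binary_str.toList
  if n < 1 then false              -- Python: raise ValueError (excluded by Pre_)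
  else if s.any (fun ch => !(ch == '0' || ch == '1')) then false  -- Python: raise ValueError (excluded by Pre_)
  else if (s.length : Int) < n then false
  else
    let bc := pvRunFold s
    if bc.1 = s.length then true
    else decide (n ≤ ((max bc.1 (pvPrefixOnes s + bc.2) : Nat) : Int))

-- ===== PRECONDITION & SPEC =====
-- Pre_ excludes exactly the inputs where A raises ValueError: n < 1, or a character other than '0'/'1'.
def Pre_has_n_consecutive_ones_circular (binary_str : String) (n : Int) : Prop :=
  1 ≤ n ∧ binary_str.toList.all (fun ch => ch == '0' || ch == '1') = true
instance (binary_str : String) (n : Int) : Decidable (Pre_has_n_consecutive_ones_circular binary_str n) := by unfold Pre_has_n_consecutive_ones_circular; infer_instance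

def pvWitness_has_n_consecutive_ones_circular : String × Int := ("1011", 2)

def Spec_has_n_consecutive_ones_circular (binary_str : String) (n : Int) (out : Bool) : Prop := out = has_n_consecutive_ones_circular_alt binary_str n
instance (binary_str : String) (n : Int) (out : Bool) : Decidable (Spec_has_n_consecutive_ones_circular binary_str n out) := by unfold Spec_has_n_consecutive_ones_circular; infer_instance

-- ===== CLAIM (what is proved, stated in full; the proofs are below) =====
def Claim_equal_has_n_consecutive_ones_circular : Prop := ∀ (binary_str : String) (n : Int), Dom_has_n_consecutive_ones_circular binary_str n → Pre_has_n_consecutive_ones_circular binary_str n → Spec_has_n_consecutive_ones_circular binary_str n (has_n_consecutive_ones_circular binary_str n)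

-- ===== LEMMAS AND PROOFS =====

-- longest run of '1's, characterised by suffixes (proof-side only)
def pvBest : List Char → Nat
  | [] => 0
  | c :: t => max (pvPrefixOnes (c :: t)) (pvBest t)

-- trailing run of '1's (proof-side only)
def pvQ : List Char → Nat
  | [] => 0
  | c :: t => if c = '1' ∧ pvPrefixOnes t = t.length then t.length + 1 else pvQ t

theorem pv_prefix_iff (u : List Char) (k : Nat) :
    List.replicate k '1' <+: u ↔ k ≤ pvPrefixOnes u := by
  induction u generalizing k with
  | nil =>
    cases k with
    | zero => simp [pvPrefixOnes]
    | succ k => simp [pvPrefixOnes, List.replicate_succ]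
  | cons c t ih =>
    cases k with
    | zero => simp
    | succ k =>
      rw [List.replicate_succ, List.cons_prefix_cons, ih]
      by_cases hc : c = '1'
      · simp [pvPrefixOnes, hc]
      · simp [pvPrefixOnes, hc, eq_comm]

theorem pv_infix_iff (u : List Char) (k : Nat) :
    List.replicate k '1' <:+: u ↔ k ≤ pvBest u := by
  induction u with
  | nil => cases k <;> simp [pvBest, List.replicate_succ]
  | cons c t ih =>
    rw [List.infix_cons_iff, ih, pv_prefix_iff]
    simp only [pvBest]
    omega

theorem pv_p_le_best (u : List Char) : pvPrefixOnes u ≤ pvBest u := by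
  cases u with
  | nil => simp [pvPrefixOnes, pvBest]
  | cons c t => simp [pvBest]

theorem pv_p_le_len (u : List Char) : pvPrefixOnes u ≤ u.length := by
  induction u with
  | nil => simp [pvPrefixOnes]
  | cons c t ih =>
    simp only [pvPrefixOnes, List.length_cons]
    split <;> omega

theorem pv_best_le_len (u : List Char) : pvBest u ≤ u.length := by
  induction u with
  | nil => simp [pvBest]
  | cons c t ih =>
    have := pv_p_le_len (c :: t)
    simp only [pvBest, List.length_cons] at *
    omega

theorem pv_best_eq_len (u : List Char) (h : pvBest u = u.length) : pvPrefixOnes u = u.length := by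
  cases u with
  | nil => simp [pvPrefixOnes]
  | cons c t =>
    have h2 := pv_best_le_len t
    have h3 := pv_p_le_len (c :: t)
    simp only [pvBest, List.length_cons] at *
    omega

theorem pv_q_all_ones (u : List Char) (h : pvPrefixOnes u = u.length) : pvQ u = u.length := by
  cases u with
  | nil => simp [pvQ]
  | cons c t =>
    simp only [pvPrefixOnes, List.length_cons] at h
    by_cases hc : c = '1'
    · rw [if_pos hc] at h
      have ht : pvPrefixOnes t = t.length := by omega
      simp [pvQ, hc, ht]
    · rw [if_neg hc] at h
      omega

theorem pv_p_append (u v : List Char) :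
    pvPrefixOnes (u ++ v) = if pvPrefixOnes u = u.length then u.length + pvPrefixOnes v else pvPrefixOnes u := by
  induction u with
  | nil => simp [pvPrefixOnes]
  | cons c t ih =>
    have := pv_p_le_len t
    by_cases hc : c = '1'
    · simp [List.cons_append, pvPrefixOnes, hc, ih]
      split_ifs <;> omega
    · simp [List.cons_append, pvPrefixOnes, hc]

theorem pv_best_append (u v : List Char) :
    pvBest (u ++ v) = max (pvQ u + pvPrefixOnes v) (max (pvBest u) (pvBest v)) := by
  induction u with
  | nil =>
    have := pv_p_le_best v
    simp only [List.nil_append, pvQ, pvBest]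
    omega
  | cons c t ih =>
    have hpl := pv_p_le_len t
    have hpb := pv_p_le_best t
    have hppa := pv_p_append t v
    have hpv := pv_p_le_len v
    by_cases hc : c = '1'
    · by_cases ht : pvPrefixOnes t = t.length
      · have hq : pvQ t = t.length := pv_q_all_ones t ht
        have hb : pvBest t = t.length := le_antisymm (pv_best_le_len t) (ht ▸ hpb)
        simp [List.cons_append, pvBest, pvQ, pvPrefixOnes, ih, hc, hppa, ht, hq, hb]
        omega
      · simp [List.cons_append, pvBest, pvQ, pvPrefixOnes, ih, hc, hppa, ht]
        omega
    · simp [List.cons_append, pvBest, pvQ, pvPrefixOnes, ih, hc]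

theorem pv_fold_eq (u : List Char) (b c : Nat) (h : c ≤ b) :
    u.foldl (fun bc ch =>
      let cur := if ch = '1' then bc.2 + 1 else 0
      (if bc.1 < cur then cur else bc.1, cur)) (b, c)
    = (max b (max (c + pvPrefixOnes u) (pvBest u)),
       if pvPrefixOnes u = u.length then c + u.length else pvQ u) := by
  induction u generalizing b c with
  | nil =>
    simp [pvPrefixOnes, pvBest, Prod.ext_iff]
    all_goals omega
  | cons ch t ih =>
    have hpl := pv_p_le_len t
    have hpb := pv_p_le_best t
    rw [List.foldl_cons]
    by_cases hc : ch = '1'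
    · subst hc
      have hstep : (let cur := if ('1' : Char) = '1' then (b, c).2 + 1 else 0
          (if (b, c).1 < cur then cur else (b, c).1, cur)) = ((max b (c+1) : Nat), c+1) := by
        simp [Prod.ext_iff, Nat.max_def]
        all_goals split_ifs <;> omega
      rw [hstep, ih _ _ (le_max_right _ _)]
      by_cases ht : pvPrefixOnes t = t.length
      · have hq : pvQ t = t.length := pv_q_all_ones t ht
        simp [pvPrefixOnes, pvBest, ht, Prod.ext_iff]
        all_goals omega
      · simp [pvPrefixOnes, pvBest, pvQ, ht, Prod.ext_iff]
        all_goals omega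
    · have hstep : (let cur := if ch = '1' then (b, c).2 + 1 else 0
          (if (b, c).1 < cur then cur else (b, c).1, cur)) = ((b : Nat), (0 : Nat)) := by
        simp [hc]
      rw [hstep, ih b 0 (Nat.zero_le b)]
      have hcc : ¬ (ch = '1' ∧ pvPrefixOnes t = t.length) := by tauto
      by_cases ht : pvPrefixOnes t = t.length
      · have hq : pvQ t = t.length := pv_q_all_ones t ht
        simp [pvPrefixOnes, pvBest, pvQ, hc, ht, hq, Prod.ext_iff]
        all_goals omega
      · simp [pvPrefixOnes, pvBest, pvQ, hc, ht, Prod.ext_iff]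
        all_goals omega

theorem final (binary_str : String) (n : Int) :
    has_n_consecutive_ones_circular binary_str n = has_n_consecutive_ones_circular_alt binary_str n := by
  unfold has_n_consecutive_ones_circular has_n_consecutive_ones_circular_alt
  set s := binary_str.toList with hs
  by_cases h1 : n < 1
  · rw [if_pos h1, if_pos h1]
  by_cases h2 : s.any (fun ch => !(ch == '0' || ch == '1'))
  · rw [if_neg h1, if_neg h1, if_pos h2, if_pos h2]
  by_cases h3 : (s.length : Int) < n
  · rw [if_neg h1, if_neg h1, if_neg h2, if_neg h2, if_pos h3, if_pos h3]
  simp only [if_neg h1, if_neg h2, if_neg h3]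
  have hfold : pvRunFold s = (pvBest s, pvQ s) := by
    unfold pvRunFold
    rw [pv_fold_eq s 0 0 (le_refl 0)]
    have hpb := pv_p_le_best s
    by_cases ht : pvPrefixOnes s = s.length
    · have hq := pv_q_all_ones s ht
      simp [Prod.ext_iff, ht, hq]
      all_goals omega
    · simp [Prod.ext_iff, ht]
      all_goals omega
  simp only [hfold]
  have hiff : PySem.Chars.isIn (List.replicate n.toNat '1') (s ++ s) = true ↔ n.toNat ≤ pvBest (s ++ s) := by
    rw [PySem.Chars.isIn_iff_infix, pv_infix_iff]
  have hba := pv_best_append s s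
  by_cases hb : pvBest s = s.length
  · have hp : pvPrefixOnes s = s.length := pv_best_eq_len s hb
    have hq : pvQ s = s.length := pv_q_all_ones s hp
    rw [if_pos hb, hiff, hba, hq, hp, hb]
    omega
  · simp only [if_neg hb]
    apply Bool.eq_iff_iff.mpr
    rw [hiff]
    simp only [decide_eq_true_eq]
    rw [hba]
    omega

-- ===== VERDICT (by name: the statement is the Claim_ definition above) =====
theorem has_n_consecutive_ones_circular_spec : Claim_equal_has_n_consecutive_ones_circular := by
  intro binary_str n _ _
  unfold Spec_has_n_consecutive_ones_circular
  exact final binary_str n
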